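-- pv_equiv track=rewrite | github.com/sahroush/CP | codeforces/1451/D.py | f
-- ===== SOURCE A (Python) =====
-- def f(d , k):
-- 	l = 0
-- 	r = 100011
-- 	if(k == d):
-- 		return("Ashish");
-- 	while(r - l > 1):
-- 		mid = (l + r)//2;
-- 		if((k*mid)*(k*mid) * 2 <= d*d):
-- 			l = mid;
-- 		else:
-- 			r = mid;
-- 	if((k*l)*(k*l) + (k*(l+1))*(k*(l+1)) > d*d):
-- 		return("Utkarsh")
-- 	return("Ashish")
-- ===== SOURCE B (Python) =====
-- def _isqrt(n):
--     # Newton's method floor square root (n >= 0)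
--     if n == 0:
--         return 0
--     x = n
--     while True:
--         y = (x + n // x) // 2
--         if y >= x:
--             return x
--         x = y
--
-- def f(d, k):
--     if k == d:
--         return "Ashish"
--     if k == 0:
--         l = 100010
--     else:
--         l = _isqrt((d * d) // (2 * k * k))
--         if l > 100010:
--             l = 100010
--     if (k * l) ** 2 + (k * (l + 1)) ** 2 > d * d:
--         return "Utkarsh"
--     return "Ashish"
-- ===== Notes on version B (the rewrite author's own statement) =====
-- stated objective: alternative
-- what changed: Replaces the binary search over l with a closed form: l = isqrt(d*d // (2*k*k)) computed by a hand-written Newton iteration, clamped to A's cap 100010, with k==0 handled directly.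
import Mathlib
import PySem

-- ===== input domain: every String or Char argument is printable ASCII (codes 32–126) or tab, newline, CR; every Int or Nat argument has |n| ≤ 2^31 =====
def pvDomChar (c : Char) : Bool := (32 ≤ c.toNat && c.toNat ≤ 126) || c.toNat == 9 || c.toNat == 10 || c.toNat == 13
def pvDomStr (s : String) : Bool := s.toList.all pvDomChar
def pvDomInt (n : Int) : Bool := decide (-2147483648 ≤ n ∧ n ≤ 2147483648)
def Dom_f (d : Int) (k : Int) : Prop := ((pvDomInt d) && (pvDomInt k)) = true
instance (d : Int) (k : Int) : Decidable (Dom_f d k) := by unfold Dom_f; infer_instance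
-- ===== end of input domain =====

-- B replaces A's binary search by a closed form: l = isqrt(d*d // (2*k*k)) via a Newton
-- iteration, clamped to A's cap 100010, with k == 0 handled directly ("alternative").

-- ===== PORT A =====
-- A's while(r - l > 1) binary-search loop, transliterated as recursion on r - l.
def fLoop (d : Int) (k : Int) (l : Int) (r : Int) : Int :=
  if r - l > 1 then
    let mid := PySem.Int.floordiv (l + r) 2
    if (k * mid) * (k * mid) * 2 ≤ d * d then fLoop d k mid r
    else fLoop d k l mid
  else l
termination_by (r - l).toNat
decreasing_by
  all_goals
    rw [PySem.Int.floordiv_eq_ediv_of_pos (by norm_num : (0:Int) < 2)] at *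
  all_goals omega

def f (d : Int) (k : Int) : String :=
  if k = d then "Ashish"
  else
    let l := fLoop d k 0 100011
    if (k * l) * (k * l) + (k * (l + 1)) * (k * (l + 1)) > d * d then "Utkarsh"
    else "Ashish"

-- ===== PORT B =====
-- Source B's `while True` Newton loop; fuel n.toNat suffices since x strictly decreases
-- towards the root each continuing iteration (proved below).
def isqrtGo (n : Int) : Nat → Int → Int
  | 0, x => x
  | fuel + 1, x =>
    let y := PySem.Int.floordiv (x + PySem.Int.floordiv n x) 2
    if y ≥ x then x else isqrtGo n fuel y

def isqrtB (n : Int) : Int := if n = 0 then 0 else isqrtGo n n.toNat n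

def f_alt (d : Int) (k : Int) : String :=
  if k = d then "Ashish"
  else
    let l :=
      if k = 0 then (100010 : Int)
      else
        let l0 := isqrtB (PySem.Int.floordiv (d * d) (2 * (k * k)))
        if l0 > 100010 then 100010 else l0
    if (k * l) ^ 2 + (k * (l + 1)) ^ 2 > d * d then "Utkarsh"
    else "Ashish"

-- ===== PRECONDITION & SPEC =====
def Spec_f (d : Int) (k : Int) (out : String) : Prop := out = f_alt d k
instance (d : Int) (k : Int) (out : String) : Decidable (Spec_f d k out) := by unfold Spec_f; infer_instance

-- ===== CLAIM (what is proved, stated in full; the proofs are below) =====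
def Claim_equal_f : Prop := ∀ (d : Int) (k : Int), Dom_f d k → Spec_f d k (f d k)

-- ===== LEMMAS AND PROOFS =====

-- Newton loop: starting at any x ≥ s it returns s, the floor square root of n.
lemma isqrtGo_eq (n s : Int) (hn : 1 ≤ n) (hs1 : 1 ≤ s)
    (hlo : s * s ≤ n) (hhi : n < (s + 1) * (s + 1)) :
    ∀ (fuel : Nat) (x : Int), s ≤ x → (x - s).toNat ≤ fuel → isqrtGo n fuel x = s := by
  intro fuel
  induction fuel with
  | zero =>
    intro x hsx hf
    have : x = s := by omega
    simp [isqrtGo, this]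
  | succ m ih =>
    intro x hsx hf
    have hx0 : 0 < x := by omega
    -- t = n // x : t * x ≤ n < (t+1) * x
    set t := PySem.Int.floordiv n x with ht
    have htc : t * x ≤ n ∧ n < (t + 1) * x :=
      (PySem.Int.floordiv_eq_iff_of_pos hx0).mp ht.symm
    have ht0 : 0 ≤ t := by nlinarith [htc.2]
    rw [isqrtGo]
    simp only [← ht, ge_iff_le]
    by_cases hxs : x = s
    · -- at the root: t ≥ s, so y ≥ x and we stop
      have hts : s ≤ t := by nlinarith [htc.2]
      have hy : x ≤ PySem.Int.floordiv (x + t) 2 := by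
        rw [PySem.Int.le_floordiv_iff_mul_le (by norm_num)]
        omega
      rw [if_pos hy, hxs]
    · -- above the root: y < x and s ≤ y, recurse
      have hsx' : s < x := lt_of_le_of_ne hsx (fun h => hxs h.symm)
      have hts : t ≤ s := by nlinarith [htc.1]
      have hylt : PySem.Int.floordiv (x + t) 2 < x := by
        rw [PySem.Int.floordiv_lt_iff_lt_mul (by norm_num)]
        omega
      have hyge : s ≤ PySem.Int.floordiv (x + t) 2 := by
        rw [PySem.Int.le_floordiv_iff_mul_le (by norm_num)]
        by_contra h
        push Not at h
        nlinarith [htc.1, htc.2, sq_nonneg (s - x)]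
      rw [if_neg (by omega)]
      exact ih _ hyge (by omega)

-- isqrtB's bracket for positive input.
lemma isqrtB_spec (n : Int) (hn : 1 ≤ n) :
    1 ≤ isqrtB n ∧ isqrtB n * isqrtB n ≤ n ∧ n < (isqrtB n + 1) * (isqrtB n + 1) := by
  set s : Int := ((Nat.sqrt n.toNat : Nat) : Int) with hsdef
  have hnn : (0:Int) ≤ n := by omega
  have hlo : s * s ≤ n := by
    have h1 := Nat.sqrt_le' n.toNat
    zify at h1
    rw [Int.toNat_of_nonneg hnn, pow_two] at h1
    exact h1
  have hhi : n < (s + 1) * (s + 1) := by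
    have h2 := Nat.lt_succ_sqrt' n.toNat
    zify at h2
    rw [Int.toNat_of_nonneg hnn] at h2
    nlinarith [h2]
  have hs1 : 1 ≤ s := by nlinarith [Int.natCast_nonneg (Nat.sqrt n.toNat)]
  have hsn : s ≤ n := by nlinarith
  have : isqrtB n = s := by
    unfold isqrtB
    rw [if_neg (by omega)]
    exact isqrtGo_eq n s hn hs1 hlo hhi n.toNat n hsn (by omega)
  rw [this]
  exact ⟨hs1, hlo, hhi⟩

-- A's binary search converges to L when L is exactly the threshold of the midpoint test.
lemma fLoop_eq (d k L : Int) (hL0 : 0 ≤ L) (hL1 : L ≤ 100010)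
    (hmid : ∀ m : Int, 0 < m → m < 100011 → ((k * m) * (k * m) * 2 ≤ d * d ↔ m ≤ L)) :
    ∀ (fuel : Nat) (l r : Int), (r - l).toNat ≤ fuel →
      0 ≤ l → r ≤ 100011 → l ≤ L → L < r → fLoop d k l r = L := by
  intro fuel
  induction fuel with
  | zero => intro l r hf h0 h1 h2 h3; omega
  | succ m ih =>
    intro l r hf h0 h1 h2 h3
    rw [fLoop]
    by_cases hlr : r - l > 1
    · rw [if_pos hlr]
      have hmid2 : PySem.Int.floordiv (l + r) 2 = (l + r) / 2 :=
        PySem.Int.floordiv_eq_ediv_of_pos (by norm_num)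
      set mid := PySem.Int.floordiv (l + r) 2 with hm
      have hb1 : l < mid := by omega
      have hb2 : mid < r := by omega
      have hiff := hmid mid (by omega) (by omega)
      by_cases hc : (k * mid) * (k * mid) * 2 ≤ d * d
      · rw [if_pos hc]
        exact ih mid r (by omega) (by omega) h1 (hiff.mp hc) h3
      · rw [if_neg hc]
        have : ¬ mid ≤ L := fun h => hc (hiff.mpr h)
        exact ih l mid (by omega) h0 (by omega) h2 (by omega)
    · rw [if_neg hlr]
      omega

-- The l computed by the two programs agree.
lemma l_agree (d k : Int) :
    fLoop d k 0 100011 =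
      (if k = 0 then (100010 : Int)
       else
         let l0 := isqrtB (PySem.Int.floordiv (d * d) (2 * (k * k)))
         if l0 > 100010 then 100010 else l0) := by
  by_cases hk : k = 0
  · rw [if_pos hk]
    apply fLoop_eq d k 100010 (by norm_num) (by norm_num) _ 100011 0 100011 (by norm_num)
      (by norm_num) (by norm_num) (by norm_num) (by norm_num)
    intro m hm0 hm1
    subst hk
    constructor
    · intro _; omega
    · intro _; nlinarith [mul_self_nonneg d]
  · rw [if_neg hk]
    have hkk : (1 : Int) ≤ k * k := by
      rcases lt_or_gt_of_ne hk with h | h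
      · nlinarith
      · nlinarith
    have hden : (0 : Int) < 2 * (k * k) := by omega
    set q := PySem.Int.floordiv (d * d) (2 * (k * k)) with hq
    have hqc : q * (2 * (k * k)) ≤ d * d ∧ d * d < (q + 1) * (2 * (k * k)) :=
      (PySem.Int.floordiv_eq_iff_of_pos hden).mp hq.symm
    have hq0 : 0 ≤ q := by nlinarith [hqc.2, mul_self_nonneg d]
    by_cases hq1 : q = 0
    · -- q = 0: both l's are 0
      have hiB : isqrtB q = 0 := by rw [hq1]; simp [isqrtB]
      simp only [hiB]
      rw [if_neg (by norm_num)]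
      apply fLoop_eq d k 0 (by norm_num) (by norm_num) _ 100011 0 100011 (by norm_num)
        (by norm_num) (by norm_num) (by norm_num) (by norm_num)
      intro m hm0 hm1
      constructor
      · intro hP
        by_contra h
        push Not at h
        have h2 : d * d < 2 * (k * k) := by nlinarith [hqc.2]
        have hm2 : 1 ≤ m * m := by nlinarith
        nlinarith [mul_le_mul_of_nonneg_left hm2 (by nlinarith : (0:Int) ≤ k * k)]
      · intro h; omega
    · -- q ≥ 1
      obtain ⟨hs1, hslo, hshi⟩ := isqrtB_spec q (by omega)
      set s := isqrtB q with hs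
      have key : ∀ m : Int, 0 < m → m < 100011 →
          ((k * m) * (k * m) * 2 ≤ d * d ↔ m ≤ s) := by
        intro m hm0 hm1
        constructor
        · intro hP
          have hm2q : m * m ≤ q := by nlinarith [hqc.2]
          nlinarith
        · intro hms
          have hm2 : m * m ≤ q := by nlinarith
          nlinarith [hqc.1]
      by_cases hbig : s > 100010
      · rw [if_pos hbig]
        apply fLoop_eq d k 100010 (by norm_num) (by norm_num) _ 100011 0 100011 (by norm_num)
          (by norm_num) (by norm_num) (by norm_num) (by norm_num)
        intro m hm0 hm1
        rw [key m hm0 hm1]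
        omega
      · rw [if_neg hbig]
        apply fLoop_eq d k s (by omega) (by omega) key 100011 0 100011 (by norm_num)
          (by norm_num) (by norm_num) (by omega) (by omega)

-- ===== VERDICT (by name: the statement is the Claim_ definition above) =====
theorem f_spec : Claim_equal_f := by
  intro d k _
  unfold Spec_f f f_alt
  by_cases hkd : k = d
  · rw [if_pos hkd, if_pos hkd]
  · rw [if_neg hkd, if_neg hkd, ← l_agree d k]
    simp only [pow_two]
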